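-- pv_equiv track=rewrite | github.com/nadaa216/IEEE-CS-25 | Rookies/Task3/D - Balanced Team.py | max_balanced_team
-- ===== SOURCE A (Python) =====
-- def max_balanced_team(n, skills):
--     skills.sort()
--     left = 0
--     max_team_size = 0
--     for right in range(n):
--         while skills[right] - skills[left] > 5:
--             left += 1
--         max_team_size = max(max_team_size, right - left + 1)
--     return max_team_size
-- ===== SOURCE B (Python) =====
-- def max_balanced_team(n, skills):
--     skills.sort()
--     best = 0
--     for i in range(n):
--         cnt = sum(1 for j in range(n) if skills[i] - 5 <= skills[j] <= skills[i])
--         best = max(best, cnt)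
--     return best
-- ===== Notes on version B (the rewrite author's own statement) =====
-- stated objective: alternative
-- what changed: A's sliding-window two-pointer scan over the sorted list is replaced by direct counting: for each element B counts, with a full pass, how many elements lie in [skills[i]-5, skills[i]] and takes the maximum of these counts; no window state is maintained.
import Mathlib
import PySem

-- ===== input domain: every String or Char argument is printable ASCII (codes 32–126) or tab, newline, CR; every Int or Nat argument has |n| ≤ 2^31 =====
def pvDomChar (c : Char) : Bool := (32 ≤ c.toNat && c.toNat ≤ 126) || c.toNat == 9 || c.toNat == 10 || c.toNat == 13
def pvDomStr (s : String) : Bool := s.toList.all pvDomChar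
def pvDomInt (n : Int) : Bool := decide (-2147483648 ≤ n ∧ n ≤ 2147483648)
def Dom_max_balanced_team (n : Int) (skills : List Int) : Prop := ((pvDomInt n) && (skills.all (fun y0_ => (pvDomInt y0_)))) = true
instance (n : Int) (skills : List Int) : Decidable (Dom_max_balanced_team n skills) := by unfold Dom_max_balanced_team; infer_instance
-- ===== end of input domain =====

-- B replaces A's sliding-window two-pointer scan by direct counting: for each element it
-- counts, with a full pass, how many elements lie in [skills[i]-5, skills[i]] and takes the
-- maximum of the counts — an alternative algorithm, no window state. Both A and B sort
-- `skills` in place (same side effect); the equivalence proved is about the return value.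

-- ===== PORT A =====
-- inner `while skills[right] - skills[left] > 5: left += 1`; fuel only makes the
-- recursion total, under Pre_ it is never exhausted (left stops at or before right)
def pvWhileA (s : List Int) (r : Int) (fuel : Nat) (left : Int) : Int :=
  match fuel with
  | 0 => left
  | f + 1 =>
    if PySem.List.pyGetD s r 0 - PySem.List.pyGetD s left 0 > 5 then
      pvWhileA s r f (left + 1)
    else left

def max_balanced_team (n : Int) (skills : List Int) : Int :=
  let s := PySem.List.sorted skills (fun x => x) false
  ((PySem.List.pyRange 0 n 1).foldl
    (fun (st : Int × Int) right =>
      let left := pvWhileA s right (s.length + 1) st.1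
      (left, max st.2 (right - left + 1)))
    (0, 0)).2

-- ===== PORT B =====
-- Source B: `cnt = sum(1 for j in range(n) if skills[i] - 5 <= skills[j] <= skills[i])`
def max_balanced_team_alt (n : Int) (skills : List Int) : Int :=
  let s := PySem.List.sorted skills (fun x => x) false
  (PySem.List.pyRange 0 n 1).foldl
    (fun (best : Int) i =>
      let vi := PySem.List.pyGetD s i 0
      let cnt := ((PySem.List.pyRange 0 n 1).map
        (fun j => if vi - 5 ≤ PySem.List.pyGetD s j 0 ∧ PySem.List.pyGetD s j 0 ≤ vi
                  then (1 : Int) else 0)).sum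
      max best cnt)
    0

-- ===== PRECONDITION & SPEC =====
-- Python A indexes skills[right] for right in range(n): it raises IndexError iff n > len(skills)
def Pre_max_balanced_team (n : Int) (skills : List Int) : Prop := n ≤ (skills.length : Int)
instance (n : Int) (skills : List Int) : Decidable (Pre_max_balanced_team n skills) := by
  unfold Pre_max_balanced_team; infer_instance

def pvWitness_max_balanced_team : Int × List Int := (4, [3, 10, 1, 8])

def Spec_max_balanced_team (n : Int) (skills : List Int) (out : Int) : Prop := out = max_balanced_team_alt n skills
instance (n : Int) (skills : List Int) (out : Int) : Decidable (Spec_max_balanced_team n skills out) := by unfold Spec_max_balanced_team; infer_instance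

-- ===== CLAIM (what is proved, stated in full; the proofs are below) =====
def Claim_equal_max_balanced_team : Prop := ∀ (n : Int) (skills : List Int), Dom_max_balanced_team n skills → Pre_max_balanced_team n skills → Spec_max_balanced_team n skills (max_balanced_team n skills)

-- ===== LEMMAS AND PROOFS =====

-- the leftmost index whose element is ≥ t (= s.length if none)
def pvLB (s : List Int) (t : Int) : Nat := s.findIdx (fun x => decide (t ≤ x))

-- the number of indices j < k with s[j] ≤ v (for sorted s): first index with v < s[j], capped at k
def pvU (s : List Int) (k : Nat) (v : Int) : Nat := min k (s.findIdx (fun x => decide (v < x)))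

-- A's per-index window size and B's per-index count, both through pvLB/pvU
def pvWin (s : List Int) (r : Nat) : Int := (r : Int) - (pvLB s (s.getD r 0 - 5) : Int) + 1
def pvCnt (s : List Int) (k i : Nat) : Int :=
  (pvU s k (s.getD i 0) : Int) - (pvLB s (s.getD i 0 - 5) : Int)

-- running maximum of f over range k, starting at 0
def pvMaxOf (f : Nat → Int) : Nat → Int
  | 0 => 0
  | k + 1 => max (pvMaxOf f k) (f k)

lemma pvLB_le_length (s : List Int) (t : Int) : pvLB s t ≤ s.length :=
  List.findIdx_le_length

lemma pvLB_lt (s : List Int) (t : Int) (j : Nat) (hj : j < pvLB s t) (hjl : j < s.length) :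
    s[j] < t := by
  have := List.not_of_lt_findIdx (p := fun x => decide (t ≤ x)) (xs := s) hj
  simp at this; omega

lemma pvLB_ge (s : List Int) (t : Int)
    (hs : ∀ (p q : Nat) (hp : p < s.length) (hq : q < s.length), p ≤ q → s[p] ≤ s[q])
    (j : Nat) (hj : pvLB s t ≤ j) (hjl : j < s.length) : t ≤ s[j] := by
  have hL : pvLB s t < s.length := lt_of_le_of_lt hj hjl
  have h1 : decide (t ≤ s[pvLB s t]) = true :=
    List.findIdx_getElem (w := hL)
  simp at h1
  exact le_trans h1 (hs _ _ hL hjl hj)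

lemma pvLB_le_of_ge (s : List Int) (t : Int) (j : Nat) (hjl : j < s.length)
    (h : t ≤ s[j]) : pvLB s t ≤ j := by
  by_contra hc
  have := pvLB_lt s t j (by omega) hjl
  omega

lemma pvU_le (s : List Int) (k : Nat) (v : Int) : pvU s k v ≤ k := Nat.min_le_left _ _

-- for sorted s and j < k ≤ len: s[j] ≤ v ↔ j < pvU s k v
lemma pvU_iff (s : List Int) (k : Nat) (v : Int)
    (hs : ∀ (p q : Nat) (hp : p < s.length) (hq : q < s.length), p ≤ q → s[p] ≤ s[q])
    (hk : k ≤ s.length) (j : Nat) (hj : j < k) :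
    s[j]'(by omega) ≤ v ↔ j < pvU s k v := by
  constructor
  · intro h
    refine lt_min hj ?_
    by_contra hc
    rw [not_lt] at hc
    have hfl : s.findIdx (fun x => decide (v < x)) < s.length := by omega
    have h1 : decide (v < s[s.findIdx (fun x => decide (v < x))]) = true :=
      List.findIdx_getElem (w := hfl)
    simp at h1
    have := hs _ j hfl (by omega) hc
    omega
  · intro h
    have hjf : j < s.findIdx (fun x => decide (v < x)) := lt_of_lt_of_le h (Nat.min_le_right _ _)
    have := List.not_of_lt_findIdx (p := fun x => decide (v < x)) (xs := s) hjf
    simp at this; omega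

-- running-max facts
lemma le_pvMaxOf (f : Nat → Int) (k r : Nat) (h : r < k) : f r ≤ pvMaxOf f k := by
  induction k with
  | zero => omega
  | succ k ih =>
    rw [pvMaxOf]
    rcases Nat.lt_succ_iff_lt_or_eq.mp h with h' | h'
    · exact le_max_of_le_left (ih h')
    · subst h'; exact le_max_right _ _

lemma pvMaxOf_nonneg (f : Nat → Int) (k : Nat) : 0 ≤ pvMaxOf f k := by
  induction k with
  | zero => simp [pvMaxOf]
  | succ k ih => rw [pvMaxOf]; exact le_max_of_le_left ih

lemma pvMaxOf_le (f : Nat → Int) (k : Nat) (X : Int) (h0 : 0 ≤ X)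
    (h : ∀ r, r < k → f r ≤ X) : pvMaxOf f k ≤ X := by
  induction k with
  | zero => simpa [pvMaxOf]
  | succ k ih =>
    rw [pvMaxOf]
    exact max_le (ih (fun r hr => h r (by omega))) (h k (by omega))

-- counting an interval inside range k
lemma countP_range_interval (k L U : Nat) (hLU : L ≤ U) :
    (List.range k).countP (fun j => decide (L ≤ j ∧ j < U)) = min U k - min L k := by
  induction k with
  | zero => simp
  | succ k ih =>
    rw [List.range_succ, List.countP_append, ih]
    have hsing : List.countP (fun j => decide (L ≤ j ∧ j < U)) [k]
        = if L ≤ k ∧ k < U then 1 else 0 := by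
      by_cases h : L ≤ k ∧ k < U <;> simp [h]
    rw [hsing]
    split_ifs with h <;> omega

-- B's inner sum equals pvCnt
lemma pvInner_eq (s : List Int)
    (hs : ∀ (p q : Nat) (hp : p < s.length) (hq : q < s.length), p ≤ q → s[p] ≤ s[q])
    (k : Nat) (hk : k ≤ s.length) (i : Nat) (hi : i < k) :
    ((PySem.List.pyRange 0 (k : Int) 1).map
      (fun j => if s.getD i 0 - 5 ≤ PySem.List.pyGetD s j 0 ∧ PySem.List.pyGetD s j 0 ≤ s.getD i 0
                then (1 : Int) else 0)).sum
    = pvCnt s k i := by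
  set v := s.getD i 0 with hv
  have hil : i < s.length := by omega
  have hvi : v = s[i] := by rw [hv, List.getD_eq_getElem _ _ hil]
  have hLi : pvLB s (v - 5) ≤ i := pvLB_le_of_ge s (v - 5) i hil (by omega)
  have hiU : i < pvU s k v := (pvU_iff s k v hs hk i hi).mp (by omega)
  have hrange : PySem.List.pyRange 0 (k : Int) 1 = (List.range k).map (fun (j : Nat) => (j : Int)) :=
    PySem.List.pyRange_zero_natCast k
  rw [hrange, List.map_map]
  have hfun : ((fun (j : Int) => if v - 5 ≤ PySem.List.pyGetD s j 0 ∧ PySem.List.pyGetD s j 0 ≤ v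
        then (1 : Int) else 0) ∘ (fun (j : Nat) => (j : Int)))
      = fun (j : Nat) => if (decide (v - 5 ≤ PySem.List.pyGetD s (j : Int) 0 ∧ PySem.List.pyGetD s (j : Int) 0 ≤ v)) = true
        then (1 : Int) else 0 := by
    funext j; simp
  rw [hfun, PySem.List.sum_map_ite_one_zero
      (fun (j : Nat) => decide (v - 5 ≤ PySem.List.pyGetD s (j : Int) 0 ∧ PySem.List.pyGetD s (j : Int) 0 ≤ v))
      (List.range k)]
  have hcong : (List.range k).countP
        (fun (j : Nat) => decide (v - 5 ≤ PySem.List.pyGetD s (j : Int) 0 ∧ PySem.List.pyGetD s (j : Int) 0 ≤ v))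
      = (List.range k).countP (fun j => decide (pvLB s (v - 5) ≤ j ∧ j < pvU s k v)) := by
    apply List.countP_congr
    intro j hj
    simp only [List.mem_range] at hj
    have hjl : j < s.length := by omega
    have hg : PySem.List.pyGetD s (j : Int) 0 = s[j] := by
      simp [List.getElem?_eq_getElem hjl]
    simp only [hg, decide_eq_true_eq]
    constructor
    · rintro ⟨h1, h2⟩
      exact ⟨pvLB_le_of_ge s (v - 5) j hjl h1, (pvU_iff s k v hs hk j hj).mp h2⟩
    · rintro ⟨h1, h2⟩
      exact ⟨pvLB_ge s (v - 5) hs j h1 hjl, (pvU_iff s k v hs hk j hj).mpr h2⟩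
  rw [hcong, countP_range_interval k (pvLB s (v - 5)) (pvU s k v) (by omega)]
  have h1 : pvU s k v ≤ k := pvU_le s k v
  unfold pvCnt
  rw [← hv]
  omega

-- A's inner while loop reaches exactly the leftmost in-window index, given enough fuel
lemma pvWhileA_eq (s : List Int)
    (hs : ∀ (p q : Nat) (hp : p < s.length) (hq : q < s.length), p ≤ q → s[p] ≤ s[q])
    (r : Nat) (hr : r < s.length) :
    ∀ (fuel l : Nat), l ≤ pvLB s (s[r] - 5) → pvLB s (s[r] - 5) ≤ r →
      r - l ≤ fuel →
      pvWhileA s (r : Int) fuel (l : Int) = ((pvLB s (s[r] - 5) : Nat) : Int) := by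
  intro fuel
  induction fuel with
  | zero =>
    intro l hl hLr hf
    have : l = pvLB s (s[r] - 5) := by omega
    simp [pvWhileA, this]
  | succ f ih =>
    intro l hl hLr hf
    have hlr : l ≤ r := le_trans hl hLr
    have hll : l < s.length := lt_of_le_of_lt hlr hr
    rw [pvWhileA]
    rw [show ((l : Int) + 1) = ((l + 1 : Nat) : Int) by push_cast; ring]
    have hgr : PySem.List.pyGetD s (r : Int) 0 = s[r] := by
      simp [List.getElem?_eq_getElem hr]
    have hgl : PySem.List.pyGetD s (l : Int) 0 = s[l] := by
      simp [List.getElem?_eq_getElem hll]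
    rw [hgr, hgl]
    rcases lt_or_eq_of_le hl with hlt | heq
    · have hcond : s[r] - s[l] > 5 := by
        have := pvLB_lt s (s[r] - 5) l hlt hll
        omega
      rw [if_pos hcond]
      exact ih (l + 1) (by omega) hLr (by omega)
    · have hcond : ¬ (s[r] - s[l] > 5) := by
        have := pvLB_ge s (s[r] - 5) hs l (le_of_eq heq.symm) hll
        omega
      rw [if_neg hcond, heq]

-- A's fold computes the running max of pvWin
lemma pvFoldA_eq (s : List Int)
    (hs : ∀ (p q : Nat) (hp : p < s.length) (hq : q < s.length), p ≤ q → s[p] ≤ s[q]) :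
    ∀ (k : Nat), k ≤ s.length →
      ∃ ℓ : Nat,
        ((PySem.List.pyRange 0 (k : Int) 1).foldl
          (fun (st : Int × Int) right =>
            let left := pvWhileA s right (s.length + 1) st.1
            (left, max st.2 (right - left + 1)))
          (0, 0))
        = ((ℓ : Int), pvMaxOf (pvWin s) k)
        ∧ (∀ r : Nat, k ≤ r → (hr : r < s.length) → ℓ ≤ pvLB s (s[r] - 5)) := by
  intro k
  induction k with
  | zero =>
    refine fun _ => ⟨0, ?_, ?_⟩
    · simp [pvMaxOf]
    · intro r _ _; omega
  | succ k ih =>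
    intro hk
    obtain ⟨ℓ, heq, hbound⟩ := ih (by omega)
    have hkl : k < s.length := by omega
    have hsplit : PySem.List.pyRange 0 ((k : Int) + 1) 1
        = PySem.List.pyRange 0 (k : Int) 1 ++ [(k : Int)] :=
      PySem.List.pyRange_one_succ_right (by exact_mod_cast Nat.zero_le k)
    set t := s[k] - 5 with ht
    have hLk : pvLB s t ≤ k := pvLB_le_of_ge s t k hkl (by omega)
    have hwhile : pvWhileA s (k : Int) (s.length + 1) (ℓ : Int) = ((pvLB s t : Nat) : Int) :=
      pvWhileA_eq s hs k hkl (s.length + 1) ℓ (hbound k le_rfl hkl) hLk (by omega)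
    refine ⟨pvLB s t, ?_, ?_⟩
    · rw [show (((k + 1 : Nat)) : Int) = (k : Int) + 1 by push_cast; ring]
      rw [hsplit, List.foldl_append, heq]
      simp only [List.foldl_cons, List.foldl_nil]
      rw [hwhile, pvMaxOf]
      have hwin : pvWin s k = (k : Int) - (pvLB s t : Int) + 1 := by
        unfold pvWin
        rw [List.getD_eq_getElem _ _ hkl, ← ht]
      rw [hwin]
    · intro r hr hrl
      have hmono : t ≤ s[r] - 5 := by
        have := hs k r hkl hrl (by omega)
        omega
      by_contra hc
      rw [not_le] at hc
      have hl : pvLB s (s[r] - 5) < s.length := lt_of_lt_of_le hc (pvLB_le_length s t)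
      have h1 := pvLB_lt s t (pvLB s (s[r] - 5)) hc hl
      have h2 := pvLB_ge s (s[r] - 5) hs (pvLB s (s[r] - 5)) le_rfl hl
      omega

-- B's fold computes the running max of pvCnt
lemma pvFoldB_eq (s : List Int)
    (hs : ∀ (p q : Nat) (hp : p < s.length) (hq : q < s.length), p ≤ q → s[p] ≤ s[q])
    (k : Nat) (hk : k ≤ s.length) :
    ∀ (m : Nat), m ≤ k →
      (PySem.List.pyRange 0 (m : Int) 1).foldl
        (fun (best : Int) i =>
          let vi := PySem.List.pyGetD s i 0
          let cnt := ((PySem.List.pyRange 0 (k : Int) 1).map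
            (fun j => if vi - 5 ≤ PySem.List.pyGetD s j 0 ∧ PySem.List.pyGetD s j 0 ≤ vi
                      then (1 : Int) else 0)).sum
          max best cnt)
        0
      = pvMaxOf (pvCnt s k) m := by
  intro m
  induction m with
  | zero => intro _; simp [pvMaxOf]
  | succ m ih =>
    intro hm
    have hml : m < s.length := by omega
    have hsplit : PySem.List.pyRange 0 ((m : Int) + 1) 1
        = PySem.List.pyRange 0 (m : Int) 1 ++ [(m : Int)] :=
      PySem.List.pyRange_one_succ_right (by exact_mod_cast Nat.zero_le m)
    rw [show (((m + 1 : Nat)) : Int) = (m : Int) + 1 by push_cast; ring]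
    rw [hsplit, List.foldl_append, ih (by omega)]
    simp only [List.foldl_cons, List.foldl_nil]
    have hg : PySem.List.pyGetD s (m : Int) 0 = s.getD m 0 := by
      rw [List.getD_eq_getElem _ _ hml]
      simp [List.getElem?_eq_getElem hml]
    rw [hg, pvInner_eq s hs k hk m (by omega), pvMaxOf]

-- the two running maxima agree
lemma pvMax_eq (s : List Int)
    (hs : ∀ (p q : Nat) (hp : p < s.length) (hq : q < s.length), p ≤ q → s[p] ≤ s[q])
    (k : Nat) (hk : k ≤ s.length) :
    pvMaxOf (pvWin s) k = pvMaxOf (pvCnt s k) k := by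
  apply le_antisymm
  · apply pvMaxOf_le _ _ _ (pvMaxOf_nonneg _ _)
    intro r hr
    have hrl : r < s.length := by omega
    have hv : s.getD r 0 = s[r] := List.getD_eq_getElem _ _ hrl
    have hrU : r < pvU s k (s.getD r 0) := by
      rw [hv]; exact (pvU_iff s k s[r] hs hk r hr).mp le_rfl
    have hwc : pvWin s r ≤ pvCnt s k r := by
      unfold pvWin pvCnt
      omega
    exact le_trans hwc (le_pvMaxOf _ _ _ hr)
  · apply pvMaxOf_le _ _ _ (pvMaxOf_nonneg _ _)
    intro i hi
    have hil : i < s.length := by omega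
    set v := s.getD i 0 with hv
    have hvi : v = s[i] := by rw [hv, List.getD_eq_getElem _ _ hil]
    have hiU : i < pvU s k v := by
      rw [hvi]; exact (pvU_iff s k s[i] hs hk i hi).mp le_rfl
    set r := pvU s k v - 1 with hr
    have hrk : r < k := by have := pvU_le s k v; omega
    have hrl : r < s.length := by omega
    have hsr : s[r] = v := by
      have h1 : s[r]'(hrl) ≤ v := (pvU_iff s k v hs hk r hrk).mpr (by omega)
      have h2 : s[i] ≤ s[r] := hs i r hil hrl (by omega)
      omega
    have hwin : pvWin s r = pvCnt s k i := by
      unfold pvWin pvCnt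
      rw [List.getD_eq_getElem _ _ hrl, hsr, ← hv]
      omega
    rw [← hwin]
    exact le_pvMaxOf _ _ _ hrk

-- sortedness of PySem.List.sorted as index-monotonicity
lemma pvSorted_mono (xs : List Int) :
    ∀ (p q : Nat) (hp : p < (PySem.List.sorted xs (fun x => x) false).length)
      (hq : q < (PySem.List.sorted xs (fun x => x) false).length), p ≤ q →
      (PySem.List.sorted xs (fun x => x) false)[p] ≤ (PySem.List.sorted xs (fun x => x) false)[q] := by
  intro p q hp hq hpq
  exact PySem.List.sorted_id_getElem_mono xs hpq hq

-- ===== VERDICT (by name: the statement is the Claim_ definition above) =====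
theorem max_balanced_team_spec : Claim_equal_max_balanced_team := by
  intro n skills _ hpre
  unfold Spec_max_balanced_team
  simp only [max_balanced_team, max_balanced_team_alt]
  set s := PySem.List.sorted skills (fun x => x) false with hsdef
  have hlen : s.length = skills.length := PySem.List.length_sorted skills (fun x => x) false
  by_cases hn : n ≤ 0
  · rw [PySem.List.pyRange_one_eq_nil hn]
    simp
  · rw [not_le] at hn
    have hnn : n = ((n.toNat : Nat) : Int) := by omega
    have hk : n.toNat ≤ s.length := by
      unfold Pre_max_balanced_team at hpre
      omega
    obtain ⟨ℓ, heq, _⟩ := pvFoldA_eq s (pvSorted_mono skills) n.toNat hk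
    rw [hnn, heq, pvFoldB_eq s (pvSorted_mono skills) n.toNat hk n.toNat le_rfl,
      pvMax_eq s (pvSorted_mono skills) n.toNat hk]
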